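-- pv_equiv track=rewrite | github.com/Minnerman/dental-pms | backend/app/services/finance_reports_pdf.py | _profile_lines
-- ===== SOURCE A (Python) =====
-- def _profile_lines(profile: dict[str, str | None]) -> tuple[str, list[str], str]:
--     name = profile.get("name") or "Practice"
--     address_line1 = profile.get("address_line1") or ""
--     address_line2 = profile.get("address_line2") or ""
--     city = profile.get("city") or ""
--     postcode = profile.get("postcode") or ""
--     phone = profile.get("phone") or ""
--     website = profile.get("website") or ""
--     email = profile.get("email") or ""
--
--     lines: list[str] = []
--     for entry in [address_line1, address_line2]:
--         if entry and entry not in lines: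
--             lines.append(entry)
--     city_line = " ".join(part for part in [city, postcode] if part)
--     if city_line and city_line not in lines:
--         lines.append(city_line)
--     if website and website not in lines:
--         lines.append(website)
--     if email and email not in lines:
--         lines.append(email)
--
--     return name, lines, phone
-- ===== SOURCE B (Python) =====
-- def _profile_lines(profile):
--     name = profile.get("name") or "Practice"
--     phone = profile.get("phone") or ""
--     city = profile.get("city") or ""
--     postcode = profile.get("postcode") or ""
--     city_line = " ".join(p for p in (city, postcode) if p)
--
--     def dedup(cs):
--         # head-first recursion: drop the head's later duplicates from the
--         # remainder, keep the head itself if non-empty; no membership test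
--         # against the output is ever made
--         if not cs:
--             return []
--         head = cs[0]
--         rest = dedup([c for c in cs[1:] if c != head])
--         return ([head] if head else []) + rest
--
--     lines = dedup([profile.get("address_line1") or "",
--                    profile.get("address_line2") or "",
--                    city_line,
--                    profile.get("website") or "",
--                    profile.get("email") or ""])
--     return name, lines, phone
-- ===== Notes on version B (the rewrite author's own statement) =====
-- stated objective: alternative
-- what changed: Replaces A's accumulator-with-membership-test appends by a head-first recursive dedup over a single candidate list that deletes each head's later duplicates from the remainder, so no membership test against the output ever occurs.
import Mathlib
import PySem

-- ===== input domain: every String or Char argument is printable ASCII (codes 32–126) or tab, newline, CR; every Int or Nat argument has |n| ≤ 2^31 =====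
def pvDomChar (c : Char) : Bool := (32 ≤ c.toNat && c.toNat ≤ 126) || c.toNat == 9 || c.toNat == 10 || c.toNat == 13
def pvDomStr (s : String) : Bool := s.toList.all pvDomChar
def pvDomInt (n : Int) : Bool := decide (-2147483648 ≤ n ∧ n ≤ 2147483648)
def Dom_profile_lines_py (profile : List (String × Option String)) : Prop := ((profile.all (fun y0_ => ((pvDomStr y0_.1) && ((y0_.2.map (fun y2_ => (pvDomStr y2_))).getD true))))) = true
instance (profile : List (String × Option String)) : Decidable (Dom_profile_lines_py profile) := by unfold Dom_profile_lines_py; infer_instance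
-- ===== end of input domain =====

-- B replaces A's accumulator-with-membership-test appends by a head-first recursive dedup
-- of one candidate list that deletes each head's later duplicates from the remainder
-- (alternative decomposition; same result).

-- ===== PORT A =====
-- `profile.get(k) or dflt`: dict.get returns None when missing; `or` replaces None and "" by dflt
def pvGetOr (profile : List (String × Option String)) (k dflt : String) : String :=
  match (PySem.Dict.mk profile).get? k with
  | some (some s) => if s = "" then dflt else s
  | _ => dflt

-- body of A's `if entry and entry not in lines: lines.append(entry)`
def pvStepA (ls : List String) (e : String) : List String :=
  if e ≠ "" ∧ e ∉ ls then ls ++ [e] else ls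

def profile_lines_py (profile : List (String × Option String)) : String × List String × String :=
  let name := pvGetOr profile "name" "Practice"
  let address_line1 := pvGetOr profile "address_line1" ""
  let address_line2 := pvGetOr profile "address_line2" ""
  let city := pvGetOr profile "city" ""
  let postcode := pvGetOr profile "postcode" ""
  let phone := pvGetOr profile "phone" ""
  let website := pvGetOr profile "website" ""
  let email := pvGetOr profile "email" ""
  let lines := [address_line1, address_line2].foldl pvStepA []
  let city_line := PySem.Str.join " " (([city, postcode]).filter (fun p => p ≠ ""))
  let lines := pvStepA lines city_line
  let lines := pvStepA lines website
  let lines := pvStepA lines email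
  (name, lines, phone)

-- ===== PORT B =====
-- B's inner `dedup`: drop the head's later duplicates from the remainder,
-- keep the head itself if non-empty (no membership test against the output)
def pvDedupB : List String → List String
  | [] => []
  | h :: t =>
    (if h = "" then [] else [h]) ++ pvDedupB (t.filter (fun c => c ≠ h))
termination_by l => l.length
decreasing_by
  simp
  exact le_trans (List.length_filter_le _ _) (le_of_eq List.length_attach)

def profile_lines_py_alt (profile : List (String × Option String)) : String × List String × String :=
  let name := pvGetOr profile "name" "Practice"
  let phone := pvGetOr profile "phone" ""
  let city := pvGetOr profile "city" ""
  let postcode := pvGetOr profile "postcode" ""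
  let city_line := PySem.Str.join " " (([city, postcode]).filter (fun p => p ≠ ""))
  let lines := pvDedupB [pvGetOr profile "address_line1" "",
                         pvGetOr profile "address_line2" "",
                         city_line,
                         pvGetOr profile "website" "",
                         pvGetOr profile "email" ""]
  (name, lines, phone)

-- ===== PRECONDITION & SPEC =====
def Spec_profile_lines_py (profile : List (String × Option String)) (out : String × List String × String) : Prop := out = profile_lines_py_alt profile
instance (profile : List (String × Option String)) (out : String × List String × String) : Decidable (Spec_profile_lines_py profile out) := by unfold Spec_profile_lines_py; infer_instance

-- ===== CLAIM (what is proved, stated in full; the proofs are below) =====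
def Claim_equal_profile_lines_py : Prop := ∀ (profile : List (String × Option String)), Dom_profile_lines_py profile → Spec_profile_lines_py profile (profile_lines_py profile)

-- ===== LEMMAS AND PROOFS =====

theorem pvDedupB_nil : pvDedupB [] = [] := by
  rw [pvDedupB.eq_def]

theorem pvDedupB_cons (h : String) (t : List String) :
    pvDedupB (h :: t) = (if h = "" then [] else [h]) ++ pvDedupB (t.filter (fun c => c ≠ h)) := by
  rw [pvDedupB.eq_def]

-- pre-filtering empty strings out does not change pvDedupB's result
theorem pvDedupB_filter_ne_empty (l : List String) :
    pvDedupB (l.filter (fun c => c ≠ "")) = pvDedupB l := by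
  induction hl : l.length using Nat.strong_induction_on generalizing l with
  | _ n ih =>
    cases l with
    | nil => rfl
    | cons h t =>
      by_cases he : h = ""
      · subst he
        rw [pvDedupB_cons, if_pos rfl, List.nil_append,
            show (("" :: t).filter (fun c => c ≠ "")) = t.filter (fun c => c ≠ "") by simp]
      · rw [show ((h :: t).filter (fun c => c ≠ "")) = h :: (t.filter (fun c => c ≠ "")) by simp [he],
            pvDedupB_cons, pvDedupB_cons]
        congr 1
        rw [List.filter_filter, show (fun c => decide (c ≠ h) && decide (c ≠ "")) =
              (fun c => decide (c ≠ "") && decide (c ≠ h)) from funext (fun c => Bool.and_comm _ _),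
            ← List.filter_filter]
        exact ih _ (by subst hl; exact Nat.lt_succ_of_le (List.length_filter_le _ _)) _ rfl

-- A's append-if-nonempty-and-new loop equals B's head-first dedup of the not-yet-seen candidates
theorem foldl_pvStepA_eq_dedupB (cs : List String) (acc : List String) (hacc : "" ∉ acc) :
    cs.foldl pvStepA acc = acc ++ pvDedupB (cs.filter (fun c => c ∉ acc)) := by
  induction cs generalizing acc with
  | nil => simp [pvDedupB_nil]
  | cons h t ih =>
    by_cases he : h = ""
    · subst he
      have hstep : pvStepA acc "" = acc := by simp [pvStepA]
      have hmem : ("" :: t).filter (fun c => c ∉ acc) = "" :: t.filter (fun c => c ∉ acc) := by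
        simp [hacc]
      rw [List.foldl_cons, hstep, ih acc hacc, hmem, pvDedupB_cons, if_pos rfl, List.nil_append,
          pvDedupB_filter_ne_empty]
    · by_cases hm : h ∈ acc
      · have hstep : pvStepA acc h = acc := by simp [pvStepA, hm]
        have hmem : (h :: t).filter (fun c => c ∉ acc) = t.filter (fun c => c ∉ acc) := by
          simp [hm]
        rw [List.foldl_cons, hstep, ih acc hacc, hmem]
      · have hstep : pvStepA acc h = acc ++ [h] := by simp [pvStepA, he, hm]
        have hacc' : "" ∉ acc ++ [h] := by simp [hacc, Ne.symm he]
        rw [List.foldl_cons, hstep, ih _ hacc',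
            show (h :: t).filter (fun c => c ∉ acc) = h :: t.filter (fun c => c ∉ acc) by simp [hm],
            pvDedupB_cons, if_neg he]
        have hfilt : (t.filter (fun c => c ∉ acc)).filter (fun c => c ≠ h)
            = t.filter (fun c => c ∉ acc ++ [h]) := by
          rw [List.filter_filter]
          apply List.filter_congr
          intro c _
          by_cases hch : c = h
          · simp [hch]
          · by_cases hca : c ∈ acc <;> simp [hch, hca]
        rw [hfilt]
        simp

theorem profile_lines_py_spec : Claim_equal_profile_lines_py := by
  intro profile _
  show profile_lines_py profile = profile_lines_py_alt profile
  unfold profile_lines_py profile_lines_py_alt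
  simp only []
  rw [show ∀ a b c d e : String,
        pvStepA (pvStepA (pvStepA ([a, b].foldl pvStepA []) c) d) e
          = [a, b, c, d, e].foldl pvStepA [] from fun _ _ _ _ _ => rfl]
  rw [foldl_pvStepA_eq_dedupB _ [] (by simp)]
  simp
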